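-- pv_equiv track=rewrite | github.com/neznajko/gfg | python/check.py | check
-- ===== SOURCE A (Python) =====
-- from collections import defaultdict
--
-- def check( s ):
--     distrib_ch = defaultdict( int )
--     for ch in s: distrib_ch[ ch ] += 1
--     distrib_freq = defaultdict( int )
--     for freq in distrib_ch.values():
--         distrib_freq[ freq ] += 1
--     width_freq = len( distrib_freq )
--     if width_freq  > 2: return False
--     if width_freq == 1: return True
--     spectrum = distrib_freq.keys()
--     low_freq = min( spectrum )
--     high_freq = max( spectrum )
--     if low_freq == 1 and distrib_freq[ low_freq ] == 1:
--         return True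
--     if distrib_freq[ high_freq ] > 1: return False
--     return high_freq - low_freq == 1
-- ===== SOURCE B (Python) =====
-- from collections import Counter
--
--
-- def _all_equal(c):
--     vals = c.values()
--     return min(vals) == max(vals)
--
--
-- def check(s):
--     counts = Counter(s)
--     if _all_equal(counts):
--         return True
--     for ch in list(counts):
--         c2 = counts.copy()
--         c2[ch] -= 1
--         if c2[ch] == 0:
--             del c2[ch]
--         if _all_equal(c2):
--             return True
--     return False
-- ===== Notes on version B (the rewrite author's own statement) =====
-- stated objective: alternative
-- what changed: A builds a frequency-of-frequencies dict and decides validity by case analysis on its width and on the min/max frequency; B brute-forces the definition: the string is valid iff the character counts are already uniform or become uniform after decrementing (and dropping at zero) one distinct character's count.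
-- outside the precondition, e.g. on check(''): A raises ValueError, B raises ValueError
import Mathlib
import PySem

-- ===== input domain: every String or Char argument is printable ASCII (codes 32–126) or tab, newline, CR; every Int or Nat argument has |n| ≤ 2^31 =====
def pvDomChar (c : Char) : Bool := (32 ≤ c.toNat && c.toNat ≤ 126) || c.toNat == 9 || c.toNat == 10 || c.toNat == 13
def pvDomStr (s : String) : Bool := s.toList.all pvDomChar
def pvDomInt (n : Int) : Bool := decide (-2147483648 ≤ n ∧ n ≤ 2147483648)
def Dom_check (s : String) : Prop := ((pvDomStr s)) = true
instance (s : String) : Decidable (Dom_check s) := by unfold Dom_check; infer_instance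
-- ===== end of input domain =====

-- B replaces A's frequency-of-frequencies branch analysis by a brute-force "uniform, or
-- uniform after deleting one occurrence of some character" test (objective: alternative).

-- ===== PORT A =====
def check (s : String) : Bool :=
  let distribCh := s.toList.foldl (fun d ch => d.insert ch (d.getD ch 0 + 1))
      (PySem.Dict.empty : PySem.Dict Char Int)
  let distribFreq := distribCh.values.foldl (fun d f => d.insert f (d.getD f 0 + 1))
      (PySem.Dict.empty : PySem.Dict Int Int)
  let widthFreq := distribFreq.size
  if widthFreq > 2 then false
  else if widthFreq == 1 then true
  else
    let spectrum := distribFreq.keys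
    match PySem.List.min? spectrum id, PySem.List.max? spectrum id with
    | some lowFreq, some highFreq =>
        if lowFreq == 1 && distribFreq.getD lowFreq 0 == 1 then true
        else if distribFreq.getD highFreq 0 > 1 then false
        else highFreq - lowFreq == 1
    | _, _ => false   -- min() of an empty spectrum: ValueError (only for s = "", excluded by Pre_check)

-- ===== PORT B =====
-- _all_equal(c): min(c.values()) == max(c.values()); on the empty counter Python's min raises
-- ValueError (only reachable from s = "", excluded by Pre_check).
def pvAllEqualDict (d : PySem.Dict Char Int) : Bool :=
  let vals := d.values
  PySem.List.min? vals id == PySem.List.max? vals id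

def check_alt (s : String) : Bool :=
  let counts := PySem.Dict.counter s.toList
  if pvAllEqualDict counts then true
  else
    counts.keys.any (fun ch =>
      let c2 := counts.insert ch (counts.getD ch 0 - 1)
      let c2 := if c2.getD ch 0 == 0 then c2.erase ch else c2
      pvAllEqualDict c2)

-- ===== PRECONDITION & SPEC =====
-- On s = "" both A and B raise ValueError (min() of an empty sequence); Pre_ excludes exactly that input.
def Pre_check (s : String) : Prop := s ≠ ""
instance (s : String) : Decidable (Pre_check s) := by unfold Pre_check; infer_instance
def pvWitness_check : String := "aab"

def Spec_check (s : String) (out : Bool) : Prop := out = check_alt s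
instance (s : String) (out : Bool) : Decidable (Spec_check s out) := by unfold Spec_check; infer_instance

-- ===== CLAIM (what is proved, stated in full; the proofs are below) =====
def Claim_equal_check : Prop := ∀ (s : String), Dom_check s → Pre_check s → Spec_check s (check s)

-- ===== LEMMAS AND PROOFS =====

-- Proof-side abbreviations: A reduced to a function of the counter's value list v,
-- B reduced to a function of the distinct-key list K and the count function cnt.
def pvAllEqB (w : List Int) : Bool := PySem.List.min? w id == PySem.List.max? w id

def pvAval (v : List Int) : Bool :=
  let D : List Int := PySem.Set.ofList v
  if D.length > 2 then false
  else if D.length == 1 then true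
  else
    match PySem.List.min? D id, PySem.List.max? D id with
    | some lo, some hi =>
        if lo == 1 && (v.count lo : Int) == 1 then true
        else if (v.count hi : Int) > 1 then false
        else hi - lo == 1
    | _, _ => false

def pvVi (K : List Char) (cnt : Char → Int) (ch : Char) : List Int :=
  K.map (fun k => if k == ch then cnt ch - 1 else cnt k)

def pvVe (K : List Char) (cnt : Char → Int) (ch : Char) : List Int :=
  (K.filter (fun k => !(k == ch))).map cnt

def pvBval (K : List Char) (cnt : Char → Int) : Bool :=
  if pvAllEqB (K.map cnt) then true
  else K.any (fun ch => pvAllEqB (if cnt ch - 1 == 0 then pvVe K cnt ch else pvVi K cnt ch))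

-- basic list facts
theorem pvTwoLeLength {α : Type} {l : List α} {a b : α} (ha : a ∈ l) (hb : b ∈ l)
    (hne : a ≠ b) : 2 ≤ l.length := by
  rcases l with _ | ⟨x, _ | ⟨y, t⟩⟩ <;> simp_all

theorem pvEqSingleton {α : Type} {l : List α} {c : α} (hnd : l.Nodup) (hc : c ∈ l)
    (hall : ∀ x ∈ l, x = c) : l = [c] := by
  rcases l with _ | ⟨x, _ | ⟨y, t⟩⟩
  · simp at hc
  · simp_all
  · exfalso
    have hx := hall x (by simp)
    have hy := hall y (by simp)
    simp [hx, hy, List.nodup_cons] at hnd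

theorem pvCountPOne {l : List Char} {p : Char → Bool} {c : Char} (hnd : l.Nodup)
    (hc : c ∈ l) (hpc : p c = true) (huniq : ∀ k ∈ l, p k = true → k = c) :
    l.countP p = 1 := by
  rw [List.countP_eq_length_filter]
  have h1 : l.filter p = [c] := by
    refine pvEqSingleton (hnd.filter p) ?_ ?_
    · exact List.mem_filter.mpr ⟨hc, hpc⟩
    · intro x hx
      rcases List.mem_filter.mp hx with ⟨hxl, hxp⟩
      exact huniq x hxl hxp
  simp [h1]

theorem pvCountPUniq {l : List Char} {p : Char → Bool}
    (h1 : l.countP p = 1) {k1 k2 : Char} (hk1 : k1 ∈ l) (hk2 : k2 ∈ l)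
    (hp1 : p k1 = true) (hp2 : p k2 = true) : k1 = k2 := by
  by_contra hne
  have ha : k1 ∈ l.filter p := List.mem_filter.mpr ⟨hk1, hp1⟩
  have hb : k2 ∈ l.filter p := List.mem_filter.mpr ⟨hk2, hp2⟩
  have := pvTwoLeLength ha hb hne
  rw [List.countP_eq_length_filter] at h1
  omega

theorem pvCountMap (cnt : Char → Int) (K : List Char) (x : Int) :
    (K.map cnt).count x = K.countP (fun k => cnt k == x) := by
  simp [List.count, List.countP_map]; rfl

-- min?/max? of a nonempty Int list
theorem pvFoldlSome (f : Option Int → Int → Option Int)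
    (hf : ∀ m x, ∃ y, f (some m) x = some y) (t : List Int) :
    ∀ m : Int, ∃ m', t.foldl f (some m) = some m' := by
  induction t with
  | nil => exact fun m => ⟨m, rfl⟩
  | cons x t ih =>
    intro m
    obtain ⟨y, hy⟩ := hf m x
    simpa [List.foldl_cons, hy] using ih y

theorem pvMinSome (w : List Int) (h : w ≠ []) :
    ∃ m, PySem.List.min? w id = some m ∧ m ∈ w ∧ ∀ y ∈ w, m ≤ y := by
  have hs : ∃ m, PySem.List.min? w id = some m := by
    rcases w with _ | ⟨x, t⟩
    · simp at h
    · show ∃ m, List.foldl _ (some x) t = some m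
      exact pvFoldlSome _ (fun m x => by dsimp only; split <;> exact ⟨_, rfl⟩) t x
  obtain ⟨m, hm⟩ := hs
  exact ⟨m, hm, PySem.List.min?_mem hm, PySem.List.min?_isMin hm⟩

theorem pvMaxSome (w : List Int) (h : w ≠ []) :
    ∃ m, PySem.List.max? w id = some m ∧ m ∈ w ∧ ∀ y ∈ w, y ≤ m := by
  have hs : ∃ m, PySem.List.max? w id = some m := by
    rcases w with _ | ⟨x, t⟩
    · simp at h
    · show ∃ m, List.foldl _ (some x) t = some m
      exact pvFoldlSome _ (fun m x => by dsimp only; split <;> exact ⟨_, rfl⟩) t x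
  obtain ⟨m, hm⟩ := hs
  exact ⟨m, hm, PySem.List.max?_mem hm, PySem.List.max?_isMax hm⟩

theorem pvAllEqB_of_allE (w : List Int) (h : ∀ a ∈ w, ∀ b ∈ w, a = b) :
    pvAllEqB w = true := by
  rcases eq_or_ne w [] with hw | hw
  · subst hw; rfl
  · obtain ⟨m, hm, hmem, _⟩ := pvMinSome w hw
    obtain ⟨M, hM, hMem, _⟩ := pvMaxSome w hw
    have : m = M := h m hmem M hMem
    simp [pvAllEqB, hm, hM, this]

theorem pvAllE_of_pvAllEqB (w : List Int) (h : pvAllEqB w = true) :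
    ∀ a ∈ w, ∀ b ∈ w, a = b := by
  intro a ha b hb
  have hw : w ≠ [] := List.ne_nil_of_mem ha
  obtain ⟨m, hm, _, hmin⟩ := pvMinSome w hw
  obtain ⟨M, hM, _, hmax⟩ := pvMaxSome w hw
  rw [pvAllEqB, hm, hM] at h
  have hmM : m = M := by simpa using h
  have := hmin a ha; have := hmax a ha
  have := hmin b hb; have := hmax b hb
  omega

-- membership in the modified value lists
theorem pvMemVi (K : List Char) (cnt : Char → Int) (ch k : Char) (hk : k ∈ K)
    (hkc : k ≠ ch) : cnt k ∈ pvVi K cnt ch := by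
  refine List.mem_map.mpr ⟨k, hk, ?_⟩
  simp [hkc]

theorem pvMemVe (K : List Char) (cnt : Char → Int) (ch k : Char) (hk : k ∈ K)
    (hkc : k ≠ ch) : cnt k ∈ pvVe K cnt ch :=
  List.mem_map.mpr ⟨k, List.mem_filter.mpr ⟨hk, by simp [hkc]⟩, rfl⟩

-- a modified value list is not uniform when two untouched keys disagree
theorem pvModNotAllE (K : List Char) (cnt : Char → Int) (ch k1 k2 : Char)
    (h1 : k1 ∈ K) (h2 : k2 ∈ K) (h1c : k1 ≠ ch) (h2c : k2 ≠ ch)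
    (hvv : cnt k1 ≠ cnt k2) :
    pvAllEqB (if cnt ch - 1 == 0 then pvVe K cnt ch else pvVi K cnt ch) = false := by
  rcases hb : pvAllEqB (if cnt ch - 1 == 0 then pvVe K cnt ch else pvVi K cnt ch) with _ | _
  · rfl
  · exfalso
    apply hvv
    split at hb
    · exact pvAllE_of_pvAllEqB _ hb _ (pvMemVe K cnt ch k1 h1 h1c) _ (pvMemVe K cnt ch k2 h2 h2c)
    · exact pvAllE_of_pvAllEqB _ hb _ (pvMemVi K cnt ch k1 h1 h1c) _ (pvMemVi K cnt ch k2 h2 h2c)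

-- the two-distinct-frequencies case: brute-force deletion ↔ A's branch conditions
theorem pvCase2 (K : List Char) (cnt : Char → Int) (hnd : K.Nodup)
    (hpos : ∀ k ∈ K, 1 ≤ cnt k) (a b : Int) (hab : a < b)
    (hmem : ∀ x ∈ K.map cnt, x = a ∨ x = b)
    (hav : a ∈ K.map cnt) (hbv : b ∈ K.map cnt) :
    ((∃ ch ∈ K, pvAllEqB (if cnt ch - 1 == 0 then pvVe K cnt ch else pvVi K cnt ch) = true)
      ↔ ((a = 1 ∧ (K.map cnt).count a = 1) ∨ ((K.map cnt).count b = 1 ∧ b - a = 1))) := by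
  obtain ⟨ka, hka, hcka⟩ := List.mem_map.mp hav
  obtain ⟨kb, hkb, hckb⟩ := List.mem_map.mp hbv
  have ha1 : 1 ≤ a := by have := hpos ka hka; omega
  constructor
  · rintro ⟨ch, hch, hP⟩
    have hcv : cnt ch = a ∨ cnt ch = b := hmem _ (List.mem_map.mpr ⟨ch, hch, rfl⟩)
    rcases hc : (cnt ch - 1 == 0) with _ | _
    · -- insert path: cnt ch ≠ 1; every other key must hold cnt ch - 1
      rw [hc] at hP
      simp only [Bool.false_eq_true, if_false] at hP
      have hall := pvAllE_of_pvAllEqB _ hP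
      have hchm : cnt ch - 1 ∈ pvVi K cnt ch := List.mem_map.mpr ⟨ch, hch, by simp⟩
      have hothers : ∀ k ∈ K, k ≠ ch → cnt k = cnt ch - 1 := fun k hk hkc =>
        hall _ (pvMemVi K cnt ch k hk hkc) _ hchm
      rcases hcv with hc_a | hc_b
      · exfalso
        have hkbch : kb ≠ ch := fun h => by rw [h, hc_a] at hckb; omega
        have := hothers kb hkb hkbch
        omega
      · right
        have hkach : ka ≠ ch := fun h => by rw [h, hc_b] at hcka; omega
        have h1 := hothers ka hka hkach
        constructor
        · rw [pvCountMap]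
          refine pvCountPOne hnd hch (by simp [hc_b]) ?_
          intro k hk hpk
          by_contra hkc
          have := hothers k hk hkc
          simp only [beq_iff_eq] at hpk
          omega
        · omega
    · -- erase path: cnt ch = 1, so a = 1 and ch is the unique low-frequency key
      rw [hc] at hP
      simp only [if_pos] at hP
      have hch1 : cnt ch = 1 := by
        have := (beq_iff_eq (a := cnt ch - 1) (b := 0)).mp hc
        omega
      have hca : cnt ch = a := by
        rcases hcv with h | h
        · exact h
        · omega
      have hall := pvAllE_of_pvAllEqB _ hP
      left
      refine ⟨by omega, ?_⟩
      rw [pvCountMap]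
      refine pvCountPOne hnd hch (by simp [hca]) ?_
      intro k hk hpk
      by_contra hkc
      simp only [beq_iff_eq] at hpk
      have hkbch : kb ≠ ch := fun h => by rw [h] at hckb; omega
      have := hall _ (pvMemVe K cnt ch k hk hkc) _ (pvMemVe K cnt ch kb hkb hkbch)
      omega
  · rintro (⟨h1, hcnt1⟩ | ⟨hcnt1, hba⟩)
    · -- a = 1 and the low key is unique: delete it
      refine ⟨ka, hka, ?_⟩
      have hc : (cnt ka - 1 == 0) = true := by simp [hcka, h1]
      rw [hc]
      simp only [if_pos]
      apply pvAllEqB_of_allE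
      rw [pvCountMap] at hcnt1
      have huniq : ∀ k ∈ K, cnt k = a → k = ka := fun k hk hpk =>
        pvCountPUniq hcnt1 hk hka (by simp [hpk]) (by simp [hcka])
      have hval : ∀ x ∈ pvVe K cnt ka, x = b := by
        intro x hx
        obtain ⟨k, hkf, hkx⟩ := List.mem_map.mp hx
        rcases List.mem_filter.mp hkf with ⟨hk, hkc⟩
        have hkc' : k ≠ ka := by simpa using hkc
        rcases hmem (cnt k) (List.mem_map.mpr ⟨k, hk, rfl⟩) with h | h
        · exact absurd (huniq k hk h) hkc'
        · omega
      intro x hx y hy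
      rw [hval x hx, hval y hy]
    · -- count b = 1, b = a + 1: decrement the unique high-frequency key
      refine ⟨kb, hkb, ?_⟩
      have hc : (cnt kb - 1 == 0) = false := by
        simp only [beq_eq_false_iff_ne, ne_eq]
        rw [hckb]; omega
      rw [hc]
      simp only [Bool.false_eq_true, if_false]
      apply pvAllEqB_of_allE
      rw [pvCountMap] at hcnt1
      have huniq : ∀ k ∈ K, cnt k = b → k = kb := fun k hk hpk =>
        pvCountPUniq hcnt1 hk hkb (by simp [hpk]) (by simp [hckb])
      have hval : ∀ x ∈ pvVi K cnt kb, x = a := by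
        intro x hx
        obtain ⟨k, hk, hkx⟩ := List.mem_map.mp hx
        by_cases hkc : k = kb
        · simp only [hkc, beq_self_eq_true, if_pos] at hkx
          omega
        · simp only [beq_eq_false_iff_ne.mpr hkc, Bool.false_eq_true, if_false] at hkx
          rcases hmem (cnt k) (List.mem_map.mpr ⟨k, hk, rfl⟩) with h | h
          · omega
          · exact absurd (huniq k hk h) hkc
      intro x hx y hy
      rw [hval x hx, hval y hy]

-- reduction of port A to pvAval
theorem pvCheckEq (s : String) :
    check s = pvAval ((PySem.Dict.counter s.toList).values) := by
  unfold check pvAval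
  simp only [PySem.Dict.foldl_insert_getD_add_one_eq_counter, PySem.Dict.size,
    PySem.Dict.items_counter, List.length_map, PySem.Dict.keys_counter, PySem.Dict.getD_counter]

theorem pvValuesCounter (L : List Char) :
    (PySem.Dict.counter L).values = (PySem.Set.ofList L).map (fun k => (L.count k : Int)) := by
  simp [PySem.Dict.values, PySem.Dict.items_counter, List.map_map]

-- reduction of port B to pvBval
theorem pvC2Items (L : List Char) (ch : Char) (x : Int) (hch : ch ∈ L) :
    ((PySem.Dict.counter L).insert ch x).items
      = (PySem.Set.ofList L).map
          (fun k => if k == ch then (ch, x) else (k, (L.count k : Int))) := by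
  rw [PySem.Dict.items_insert_of_contains _ _
        (by rw [PySem.Dict.contains_counter]; simpa using hch),
      PySem.Dict.items_counter, List.map_map]
  apply List.map_congr_left
  intro k _
  by_cases h : k = ch <;> simp [h]

theorem pvViValues (L : List Char) (ch : Char) (hch : ch ∈ L) :
    ((PySem.Dict.counter L).insert ch ((L.count ch : Int) - 1)).values
      = pvVi (PySem.Set.ofList L) (fun k => (L.count k : Int)) ch := by
  rw [PySem.Dict.values, pvC2Items L ch _ hch, List.map_map, pvVi]
  apply List.map_congr_left
  intro k _
  by_cases h : k = ch <;> simp [h]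

theorem pvVeValues (L : List Char) (ch : Char) (hch : ch ∈ L) :
    (((PySem.Dict.counter L).insert ch ((L.count ch : Int) - 1)).erase ch).values
      = pvVe (PySem.Set.ofList L) (fun k => (L.count k : Int)) ch := by
  show (List.filter _ _).map _ = _
  rw [pvC2Items L ch _ hch, List.filter_map]
  have hf : List.filter ((fun (p : Char × Int) => !(p.1 == ch)) ∘
        (fun k => if k == ch then (ch, (L.count ch : Int) - 1) else (k, (L.count k : Int))))
        (PySem.Set.ofList L)
      = List.filter (fun k => !(k == ch)) (PySem.Set.ofList L) := by
    apply List.filter_congr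
    intro k _
    by_cases h : k = ch <;> simp [Function.comp, h]
  rw [hf, List.map_map, pvVe]
  apply List.map_congr_left
  intro k hk
  have hkc : ¬ (k = ch) := by
    rcases List.mem_filter.mp hk with ⟨_, h⟩
    simpa using h
  simp [Function.comp, hkc]

theorem pvAnyCongr {α : Type} (l : List α) (f g : α → Bool)
    (h : ∀ x ∈ l, f x = g x) : l.any f = l.any g := by
  induction l with
  | nil => rfl
  | cons x t ih =>
    simp only [List.any_cons, h x (List.mem_cons_self ..),
      ih (fun y hy => h y (List.mem_cons_of_mem _ hy))]

theorem pvPerCh (L : List Char) (ch : Char) (hch : ch ∈ L) :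
    (let counts := PySem.Dict.counter L
     let c2 := counts.insert ch (counts.getD ch 0 - 1)
     let c2 := if c2.getD ch 0 == 0 then c2.erase ch else c2
     pvAllEqualDict c2)
    = pvAllEqB (if (L.count ch : Int) - 1 == 0
        then pvVe (PySem.Set.ofList L) (fun k => (L.count k : Int)) ch
        else pvVi (PySem.Set.ofList L) (fun k => (L.count k : Int)) ch) := by
  dsimp only
  rw [PySem.Dict.getD_counter, PySem.Dict.getD_insert_self]
  rcases hc : ((L.count ch : Int) - 1 == 0) with _ | _
  · simp only [Bool.false_eq_true, if_false]
    show pvAllEqB _ = pvAllEqB _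
    rw [pvViValues L ch hch]
  · simp only [if_pos]
    show pvAllEqB _ = pvAllEqB _
    rw [pvVeValues L ch hch]

theorem pvCheckAltEq (s : String) :
    check_alt s = pvBval (PySem.Set.ofList s.toList) (fun k => (s.toList.count k : Int)) := by
  unfold check_alt pvBval
  have hAE : pvAllEqualDict (PySem.Dict.counter s.toList)
      = pvAllEqB ((PySem.Set.ofList s.toList).map (fun k => (s.toList.count k : Int))) := by
    rw [pvAllEqualDict, pvAllEqB, pvValuesCounter]
  dsimp only
  rw [hAE]
  congr 1
  rw [PySem.Dict.keys_counter]
  apply pvAnyCongr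
  intro ch hch
  exact pvPerCh s.toList ch ((PySem.Set.mem_ofList _ _).mp hch)

-- evaluating min?/max? on a two-element spectrum
theorem pvMinPair (a b : Int) : PySem.List.min? [a, b] id = some (if b < a then b else a) := by
  show (if (b : Int) < a then some b else some a) = _
  split <;> rfl

theorem pvMaxPair (a b : Int) : PySem.List.max? [a, b] id = some (if a < b then b else a) := by
  show (if (a : Int) < b then some b else some a) = _
  split <;> rfl

theorem pvThreeDistinct {l : List Int} (hnd : l.Nodup) (h3 : 3 ≤ l.length) :
    ∃ a b c, a ∈ l ∧ b ∈ l ∧ c ∈ l ∧ a ≠ b ∧ a ≠ c ∧ b ≠ c := by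
  rcases l with _ | ⟨x, _ | ⟨y, _ | ⟨z, t⟩⟩⟩ <;> simp at h3
  simp only [List.nodup_cons, List.mem_cons, not_or] at hnd
  exact ⟨x, y, z, by simp, by simp, by simp, by tauto, by tauto, by tauto⟩

-- A's nested branch, as a proposition (two distinct frequencies a < b)
theorem pvAIff (v : List Int) (a b : Int) (hcb : 1 ≤ v.count b) :
    ((if a == 1 && (v.count a : Int) == 1 then true
      else if (v.count b : Int) > 1 then false
      else b - a == 1) = true)
      ↔ ((a = 1 ∧ v.count a = 1) ∨ (v.count b = 1 ∧ b - a = 1)) := by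
  split_ifs with h1 h2
  · simp only [Bool.and_eq_true, beq_iff_eq] at h1
    exact iff_of_true rfl (Or.inl ⟨h1.1, by exact_mod_cast h1.2⟩)
  · simp only [Bool.and_eq_true, beq_iff_eq, not_and] at h1
    simp only [false_iff]
    rintro (⟨hx, hy⟩ | ⟨hx, _⟩)
    · have := h1 (by simp [hx])
      have : ((v.count a : Int)) = 1 := by exact_mod_cast hy
      simp_all
    · omega
  · simp only [beq_iff_eq]
    constructor
    · intro h
      right
      exact ⟨by omega, h⟩
    · rintro (⟨hx, hy⟩ | ⟨hx, hy⟩)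
      · simp only [Bool.and_eq_true, beq_iff_eq, not_and] at h1
        have := h1 (by simp [hx])
        have hcast : ((v.count a : Int)) = 1 := by exact_mod_cast hy
        simp_all
      · exact hy

-- the main combinatorial equivalence, on an arbitrary counter (K, cnt)
theorem pvMain (K : List Char) (cnt : Char → Int) (hnd : K.Nodup) (hne : K ≠ [])
    (hpos : ∀ k ∈ K, 1 ≤ cnt k) : pvAval (K.map cnt) = pvBval K cnt := by
  have hvne : K.map cnt ≠ [] := by simpa using hne
  obtain ⟨x0, t0, hx0⟩ := List.exists_cons_of_ne_nil hvne
  have hx0v : x0 ∈ K.map cnt := hx0 ▸ List.mem_cons_self ..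
  by_cases hall : ∀ a ∈ K.map cnt, ∀ b ∈ K.map cnt, a = b
  · have hB : pvBval K cnt = true := by
      rw [pvBval, pvAllEqB_of_allE _ hall]; rfl
    have hD1 : (PySem.Set.ofList (K.map cnt) : List Int) = [x0] :=
      pvEqSingleton (PySem.Set.nodup_ofList _) ((PySem.Set.mem_ofList _ _).mpr hx0v)
        (fun y hy => hall y ((PySem.Set.mem_ofList _ _).mp hy) x0 hx0v)
    rw [pvAval, hB]
    simp [hD1]
  · have hAEf : pvAllEqB (K.map cnt) = false := by
      cases h : pvAllEqB (K.map cnt)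
      · rfl
      · exact absurd (pvAllE_of_pvAllEqB _ h) hall
    have hBany : pvBval K cnt
        = K.any (fun ch => pvAllEqB (if cnt ch - 1 == 0 then pvVe K cnt ch else pvVi K cnt ch)) := by
      rw [pvBval, hAEf]; rfl
    have hDnd : (PySem.Set.ofList (K.map cnt) : List Int).Nodup := PySem.Set.nodup_ofList _
    have hDmem : ∀ x, x ∈ (PySem.Set.ofList (K.map cnt) : List Int) ↔ x ∈ K.map cnt :=
      fun x => PySem.Set.mem_ofList _ x
    have hD2 : 2 ≤ (PySem.Set.ofList (K.map cnt) : List Int).length := by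
      rcases hl : (PySem.Set.ofList (K.map cnt) : List Int) with _ | ⟨c, _ | ⟨d, t⟩⟩
      · exact absurd ((hDmem x0).mpr hx0v) (by simp [hl])
      · exfalso
        apply hall
        intro a ha b hb
        have ha' := (hDmem a).mpr ha
        have hb' := (hDmem b).mpr hb
        rw [hl] at ha' hb'
        simp at ha' hb'
        rw [ha', hb']
      · simp
    rcases Nat.lt_or_ge (PySem.Set.ofList (K.map cnt) : List Int).length 3 with h3 | h3
    · -- exactly two distinct frequencies
      have hlen : (PySem.Set.ofList (K.map cnt) : List Int).length = 2 := by omega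
      obtain ⟨a, b, hDab⟩ := List.length_eq_two.mp hlen
      have hab : a ≠ b := by
        rw [hDab] at hDnd
        simp [List.nodup_cons] at hDnd
        exact hDnd
      have hav : a ∈ K.map cnt := (hDmem a).mp (by simp [hDab])
      have hbv : b ∈ K.map cnt := (hDmem b).mp (by simp [hDab])
      have hmemv : ∀ x ∈ K.map cnt, x = a ∨ x = b := by
        intro x hx
        have := (hDmem x).mpr hx
        rw [hDab] at this
        simpa using this
      have hca : 1 ≤ (K.map cnt).count a := List.count_pos_iff.mpr hav
      have hcb : 1 ≤ (K.map cnt).count b := List.count_pos_iff.mpr hbv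
      rw [pvAval, hBany]
      rw [hlen, if_neg (by omega : ¬ (2 > 2)), if_neg (by decide : ¬ (((2:Nat) == 1) = true)),
        hDab, pvMinPair, pvMaxPair]
      rcases lt_or_gt_of_ne hab with h | h
      · rw [if_neg (by omega : ¬ b < a), if_pos h]
        rw [Bool.eq_iff_iff]
        rw [pvAIff _ a b hcb, List.any_eq_true]
        exact (pvCase2 K cnt hnd hpos a b h hmemv hav hbv).symm
      · rw [if_pos h, if_neg (by omega : ¬ a < b)]
        rw [Bool.eq_iff_iff]
        rw [pvAIff _ b a hca, List.any_eq_true]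
        exact (pvCase2 K cnt hnd hpos b a h
          (fun x hx => (hmemv x hx).symm) hbv hav).symm
    · -- three or more distinct frequencies: both sides are false
      have hA : pvAval (K.map cnt) = false := by
        rw [pvAval]
        simp only [if_pos (by omega : (PySem.Set.ofList (K.map cnt) : List Int).length > 2)]
      rw [hA, hBany]
      symm
      rw [List.any_eq_false]
      intro ch hch
      obtain ⟨a, b, c, haD, hbD, hcD, hab, hac, hbc⟩ := pvThreeDistinct hDnd h3
      obtain ⟨ka, hka, hcka⟩ := List.mem_map.mp ((hDmem a).mp haD)
      obtain ⟨kb, hkb, hckb⟩ := List.mem_map.mp ((hDmem b).mp hbD)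
      obtain ⟨kc, hkc, hckc⟩ := List.mem_map.mp ((hDmem c).mp hcD)
      by_cases hka' : ka = ch
      · have h1 : kb ≠ ch := fun h => hab (by rw [← hcka, ← hckb, hka', h])
        have h2 : kc ≠ ch := fun h => hac (by rw [← hcka, ← hckc, hka', h])
        rw [Bool.not_eq_true]
        exact pvModNotAllE K cnt ch kb kc hkb hkc h1 h2 (by rw [hckb, hckc]; exact hbc)
      · by_cases hkb' : kb = ch
        · have h2 : kc ≠ ch := fun h => hbc (by rw [← hckb, ← hckc, hkb', h])
          rw [Bool.not_eq_true]
          exact pvModNotAllE K cnt ch ka kc hka hkc hka' h2 (by rw [hcka, hckc]; exact hac)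
        · rw [Bool.not_eq_true]
          exact pvModNotAllE K cnt ch ka kb hka hkb hka' hkb' (by rw [hcka, hckb]; exact hab)

-- ===== VERDICT (by name: the statement is the Claim_ definition above) =====
theorem check_spec : Claim_equal_check := by
  unfold Claim_equal_check Spec_check
  intro s _ hpre
  have hL : s.toList ≠ [] := by simpa using hpre
  rw [pvCheckEq, pvCheckAltEq, pvValuesCounter]
  refine pvMain _ _ (PySem.Set.nodup_ofList _) ?_ ?_
  · obtain ⟨x, t, hx⟩ := List.exists_cons_of_ne_nil hL
    exact List.ne_nil_of_mem ((PySem.Set.mem_ofList _ x).mpr (hx ▸ List.mem_cons_self ..))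
  · intro k hk
    have : k ∈ s.toList := (PySem.Set.mem_ofList _ k).mp hk
    have : 0 < s.toList.count k := List.count_pos_iff.mpr this
    omega
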